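-- pv_equiv track=rewrite | github.com/abrsvn/neural_model_theoretic_interpretation_ACL_2026 | scripts/summarize_mixed_effects_tables.py | latex_escape
-- ===== SOURCE A (Python) =====
-- def latex_escape(text: str) -> str:
--     replacements = {
--         "&": "\\&",
--         "%": "\\%",
--         "$": "\\$",
--         "#": "\\#",
--         "_": "\\_",
--         "{": "\\{",
--         "}": "\\}",
--     }
--     return "".join(replacements.get(char, char) for char in text)
-- ===== SOURCE B (Python) =====
-- def latex_escape(text: str) -> str:
--     # Chain of str.replace passes, one per special character.  Order is safe:
--     # the only character ever introduced is the backslash, which is never a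
--     # replacement target, so nothing gets escaped twice.
--     return (text.replace("&", "\\&")
--                 .replace("%", "\\%")
--                 .replace("$", "\\$")
--                 .replace("#", "\\#")
--                 .replace("_", "\\_")
--                 .replace("{", "\\{")
--                 .replace("}", "\\}"))
-- ===== Notes on version B (the rewrite author's own statement) =====
-- stated objective: faster
-- what changed: Replaced the per-character dict lookup and join with a chain of seven whole-string str.replace passes (safe because only backslash is introduced and it is never a target); the scans run in C instead of a Python-level per-character loop.
import Mathlib
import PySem

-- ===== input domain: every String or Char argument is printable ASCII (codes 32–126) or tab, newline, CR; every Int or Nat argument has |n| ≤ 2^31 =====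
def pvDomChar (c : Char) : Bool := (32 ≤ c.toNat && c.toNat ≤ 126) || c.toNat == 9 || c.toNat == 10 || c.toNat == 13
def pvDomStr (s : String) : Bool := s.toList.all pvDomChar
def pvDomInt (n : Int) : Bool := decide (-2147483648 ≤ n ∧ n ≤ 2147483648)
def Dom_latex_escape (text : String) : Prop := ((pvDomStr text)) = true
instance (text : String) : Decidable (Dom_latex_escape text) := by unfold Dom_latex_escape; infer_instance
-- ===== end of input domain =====

-- B replaces A's per-character dict lookup by a chain of seven whole-string replace passes (idiomatic; same return value).

-- ===== PORT A =====
def latexReplacements : PySem.Dict Char String :=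
  PySem.Dict.ofList [('&', "\\&"), ('%', "\\%"), ('$', "\\$"), ('#', "\\#"), ('_', "\\_"), ('{', "\\{"), ('}', "\\}")]

def latex_escape (text : String) : String :=
  PySem.Str.join "" (text.toList.map (fun c => PySem.Dict.getD latexReplacements c (String.ofList [c])))

-- ===== PORT B =====
def latex_escape_alt (text : String) : String :=
  PySem.Str.replace (PySem.Str.replace (PySem.Str.replace (PySem.Str.replace (PySem.Str.replace
    (PySem.Str.replace (PySem.Str.replace text "&" "\\&") "%" "\\%") "$" "\\$") "#" "\\#")
    "_" "\\_") "{" "\\{") "}" "\\}"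

-- ===== PRECONDITION & SPEC =====
def Spec_latex_escape (text : String) (out : String) : Prop := out = latex_escape_alt text
instance (text : String) (out : String) : Decidable (Spec_latex_escape text out) := by unfold Spec_latex_escape; infer_instance

-- ===== CLAIM (what is proved, stated in full; the proofs are below) =====
def Claim_equal_latex_escape : Prop := ∀ (text : String), Dom_latex_escape text → Spec_latex_escape text (latex_escape text)

-- ===== LEMMAS AND PROOFS =====

/-- The per-character escape function both programs compute. -/
def pvEsc (c : Char) : List Char :=
  if c = '&' ∨ c = '%' ∨ c = '$' ∨ c = '#' ∨ c = '_' ∨ c = '{' ∨ c = '}' then ['\\', c] else [c]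

theorem go_single (a : Char) (new : List Char) :
    ∀ (l : List Char) (fuel : Nat) (acc : List Char), l.length ≤ fuel →
      PySem.Chars.replace.go [a] new fuel l acc =
        acc.reverse ++ l.flatMap (fun c => if c = a then new else [c]) := by
  intro l
  induction l with
  | nil =>
      intro fuel acc _
      cases fuel <;> simp [PySem.Chars.replace.go]
  | cons c t ih =>
      intro fuel acc h
      cases fuel with
      | zero => simp at h
      | succ n =>
          simp only [PySem.Chars.replace.go, List.isPrefixOf, List.flatMap_cons]
          by_cases hc : a = c
          · subst hc
            simp only [beq_self_eq_true, Bool.true_and, if_true]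
            rw [show List.drop [a].length (a :: t) = t from rfl,
              ih n (new.reverse ++ acc) (Nat.le_of_succ_le_succ h)]
            simp
          · have : (a == c) = false := beq_false_of_ne hc
            simp only [this, Bool.false_and]
            rw [if_neg (by simp), if_neg (Ne.symm hc), ih n (c :: acc) (Nat.le_of_succ_le_succ h)]
            simp

theorem replace_single (s : List Char) (a : Char) (new : List Char) :
    PySem.Chars.replace s [a] new = s.flatMap (fun c => if c = a then new else [c]) := by
  rw [PySem.Chars.replace]
  simp only [List.isEmpty_cons, if_neg Bool.false_ne_true]
  simpa using go_single a new s s.length [] le_rfl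

theorem join_nil_flatten (parts : List (List Char)) :
    PySem.Chars.join [] parts = parts.flatten := by
  induction parts with
  | nil => simp [PySem.Chars.join_nil]
  | cons p ps ih =>
      cases ps with
      | nil => simp [PySem.Chars.join_singleton]
      | cons q qs => rw [PySem.Chars.join_cons_cons, ih]; simp

theorem portA_flatMap (text : String) :
    (latex_escape text).toList = text.toList.flatMap pvEsc := by
  rw [latex_escape, PySem.Str.toList_join]
  rw [show ("" : String).toList = [] from rfl, List.map_map, join_nil_flatten, ← List.flatMap_def]
  apply List.flatMap_congr
  intro c _
  have hitems : latexReplacements.items =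
      [('&', "\\&"), ('%', "\\%"), ('$', "\\$"), ('#', "\\#"), ('_', "\\_"),
        ('{', "\\{"), ('}', "\\}")] := by decide
  simp only [Function.comp, PySem.Dict.getD, PySem.Dict.get?, hitems, pvEsc]
  by_cases h1 : c = '&'; · subst h1; decide
  by_cases h2 : c = '%'; · subst h2; decide
  by_cases h3 : c = '$'; · subst h3; decide
  by_cases h4 : c = '#'; · subst h4; decide
  by_cases h5 : c = '_'; · subst h5; decide
  by_cases h6 : c = '{'; · subst h6; decide
  by_cases h7 : c = '}'; · subst h7; decide
  simp [List.find?, beq_false_of_ne (Ne.symm h1), beq_false_of_ne (Ne.symm h2),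
    beq_false_of_ne (Ne.symm h3), beq_false_of_ne (Ne.symm h4), beq_false_of_ne (Ne.symm h5),
    beq_false_of_ne (Ne.symm h6), beq_false_of_ne (Ne.symm h7), h1, h2, h3, h4, h5, h6, h7]

theorem portB_flatMap (text : String) :
    (latex_escape_alt text).toList = text.toList.flatMap pvEsc := by
  simp only [latex_escape_alt, PySem.Str.toList_replace]
  rw [show ("&" : String).toList = ['&'] from rfl, show ("\\&" : String).toList = ['\\','&'] from rfl,
    show ("%" : String).toList = ['%'] from rfl, show ("\\%" : String).toList = ['\\','%'] from rfl,
    show ("$" : String).toList = ['$'] from rfl, show ("\\$" : String).toList = ['\\','$'] from rfl,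
    show ("#" : String).toList = ['#'] from rfl, show ("\\#" : String).toList = ['\\','#'] from rfl,
    show ("_" : String).toList = ['_'] from rfl, show ("\\_" : String).toList = ['\\','_'] from rfl,
    show ("{" : String).toList = ['{'] from rfl, show ("\\{" : String).toList = ['\\','{'] from rfl,
    show ("}" : String).toList = ['}'] from rfl, show ("\\}" : String).toList = ['\\','}'] from rfl]
  rw [replace_single, replace_single, replace_single, replace_single, replace_single,
    replace_single, replace_single]
  simp only [List.flatMap_assoc]
  apply List.flatMap_congr
  intro c _
  by_cases h1 : c = '&'; · subst h1; decide
  by_cases h2 : c = '%'; · subst h2; decide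
  by_cases h3 : c = '$'; · subst h3; decide
  by_cases h4 : c = '#'; · subst h4; decide
  by_cases h5 : c = '_'; · subst h5; decide
  by_cases h6 : c = '{'; · subst h6; decide
  by_cases h7 : c = '}'; · subst h7; decide
  simp [pvEsc, h1, h2, h3, h4, h5, h6, h7]

-- ===== VERDICT (by name: the statement is the Claim_ definition above) =====
theorem latex_escape_spec : Claim_equal_latex_escape := by
  intro text _
  unfold Spec_latex_escape
  have := (portA_flatMap text).trans (portB_flatMap text).symm
  exact String.toList_inj.mp this
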